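-- pv_equiv track=rewrite | github.com/SorokaEkim/pythonhw | lesson4/recursive/task3.py | transcript
-- ===== SOURCE A (Python) =====
-- def transcript(word):
--     data = {
--         'A': 'Alpha', 'B': 'Bravo', 'C': 'Charlie', 'D': 'Delta',
--         'E': 'Echo', 'F': 'Foxtrot', 'G': 'Golf', 'H': 'Hotel',
--         'I': 'India', 'J': 'Juliet', 'K': 'Kilo', 'L': 'Lima',
--         'M': 'Mike', 'N': 'November', 'O': 'Oscar', 'P': 'Papa',
--         'Q': 'Quebec', 'R': 'Romeo', 'S': 'Sierra', 'T': 'Tango',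
--         'U': 'Uniform', 'V': 'Victor', 'W': 'Whiskey', 'X': 'Xray',
--         'Y': 'Yankee', 'Z': 'Zulu',
--     }
--
--     word = word.upper()
--     if word == '':
--         return ''
--     else:
--         if word[0] in data:
--             letter_code = data[word[0]]
--         else:
--             letter_code = ''
--
--         return letter_code + ' ' + transcript(word[1:])
-- ===== SOURCE B (Python) =====
-- NATO = ('Alpha', 'Bravo', 'Charlie', 'Delta', 'Echo', 'Foxtrot', 'Golf',
--         'Hotel', 'India', 'Juliet', 'Kilo', 'Lima', 'Mike', 'November',
--         'Oscar', 'Papa', 'Quebec', 'Romeo', 'Sierra', 'Tango', 'Uniform',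
--         'Victor', 'Whiskey', 'Xray', 'Yankee', 'Zulu')
--
-- def transcript(word):
--     parts = []
--     for ch in word:
--         o = ord(ch)
--         if 97 <= o <= 122:
--             o -= 32
--         parts.append(NATO[o - 65] + ' ' if 65 <= o <= 90 else ' ')
--     return ''.join(parts)
-- ===== Notes on version B (the rewrite author's own statement) =====
-- stated objective: faster
-- what changed: Replaces the linear recursion over a 26-entry dict (which re-uppercases and re-slices the remaining suffix at every call) with a single pass that maps each character by ordinal arithmetic into a fixed tuple of NATO names and joins the pieces once.
import Mathlib
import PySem

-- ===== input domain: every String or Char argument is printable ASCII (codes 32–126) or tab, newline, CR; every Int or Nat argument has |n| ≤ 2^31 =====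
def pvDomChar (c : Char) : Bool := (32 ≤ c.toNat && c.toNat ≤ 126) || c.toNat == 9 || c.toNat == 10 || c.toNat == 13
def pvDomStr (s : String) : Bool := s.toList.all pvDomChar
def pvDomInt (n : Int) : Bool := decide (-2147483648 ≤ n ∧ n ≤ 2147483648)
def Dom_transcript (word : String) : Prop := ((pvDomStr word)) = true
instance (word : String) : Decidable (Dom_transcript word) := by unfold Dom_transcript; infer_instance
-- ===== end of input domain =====

-- B drops the dictionary and the recursion: it maps each character by ordinal
-- arithmetic into a fixed tuple of NATO names and joins the pieces once (measured faster).

-- ===== PORT A =====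
-- A's NATO dict (keys are the single characters Python uses as keys)
def natoData : PySem.Dict Char String := PySem.Dict.ofList
  [('A', "Alpha"), ('B', "Bravo"), ('C', "Charlie"), ('D', "Delta"),
   ('E', "Echo"), ('F', "Foxtrot"), ('G', "Golf"), ('H', "Hotel"),
   ('I', "India"), ('J', "Juliet"), ('K', "Kilo"), ('L', "Lima"),
   ('M', "Mike"), ('N', "November"), ('O', "Oscar"), ('P', "Papa"),
   ('Q', "Quebec"), ('R', "Romeo"), ('S', "Sierra"), ('T', "Tango"),
   ('U', "Uniform"), ('V', "Victor"), ('W', "Whiskey"), ('X', "Xray"),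
   ('Y', "Yankee"), ('Z', "Zulu")]

-- A's recursion on the character list: uppercase, then branch on empty / head as A does
def transcriptGo (cs : List Char) : List Char :=
  match h : PySem.Chars.upper cs with
  | [] => []
  | c :: rest =>
    let letter_code : List Char :=
      match natoData.get? c with
      | some v => v.toList
      | none => []
    letter_code ++ ' ' :: transcriptGo rest
termination_by cs.length
decreasing_by
  have := congrArg List.length h
  simp [PySem.Chars.upper] at this
  omega

def transcript (word : String) : String := String.ofList (transcriptGo word.toList)

-- ===== PORT B =====
-- B's fixed tuple of NATO names, indexed by alphabet position
def natoNames : List String :=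
  ["Alpha", "Bravo", "Charlie", "Delta", "Echo", "Foxtrot", "Golf", "Hotel",
   "India", "Juliet", "Kilo", "Lima", "Mike", "November", "Oscar", "Papa",
   "Quebec", "Romeo", "Sierra", "Tango", "Uniform", "Victor", "Whiskey", "Xray",
   "Yankee", "Zulu"]

-- the body of B's loop: one appended piece per character, by ordinal arithmetic
def natoPiece (c : Char) : List Char :=
  let o := if 97 ≤ c.toNat ∧ c.toNat ≤ 122 then c.toNat - 32 else c.toNat
  if 65 ≤ o ∧ o ≤ 90 then (natoNames.getD (o - 65) "").toList ++ [' '] else [' ']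

def transcript_alt (word : String) : String :=
  String.ofList (PySem.Chars.join [] (word.toList.map natoPiece))

-- ===== PRECONDITION & SPEC =====
def Spec_transcript (word : String) (out : String) : Prop := out = transcript_alt word
instance (word : String) (out : String) : Decidable (Spec_transcript word out) := by unfold Spec_transcript; infer_instance

-- ===== CLAIM =====
def Claim_equal_transcript : Prop := ∀ (word : String), Dom_transcript word → Spec_transcript word (transcript word)

-- ===== LEMMAS AND PROOFS =====

theorem upperChar_idem (c : Char) :
    PySem.Chars.upperChar (PySem.Chars.upperChar c) = PySem.Chars.upperChar c := by
  simp only [PySem.Chars.upperChar, PySem.Chars.islower]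
  split_ifs with h1 h2
  · exfalso
    simp only [Bool.and_eq_true, decide_eq_true_eq, Char.le_def] at h1 h2
    have h1a : 97 ≤ c.toNat := UInt32.le_iff_toNat_le.mp h1.1
    have h1b : c.toNat ≤ 122 := UInt32.le_iff_toNat_le.mp h1.2
    have hofNat : (Char.ofNat (c.toNat - 32)).toNat = c.toNat - 32 := by
      rw [Char.toNat_ofNat, if_pos (Or.inl (by omega))]
    have h2' : 97 ≤ (Char.ofNat (c.toNat - 32)).toNat := UInt32.le_iff_toNat_le.mp h2.1
    omega
  · rfl
  · rfl

theorem upper_idem (cs : List Char) :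
    PySem.Chars.upper (PySem.Chars.upper cs) = PySem.Chars.upper cs := by
  simp [PySem.Chars.upper, Function.comp, upperChar_idem]

-- A's recursive result, characterised as one piece per (uppercased) character
theorem transcriptGo_eq_flatMap (cs : List Char) :
    transcriptGo cs =
      (PySem.Chars.upper cs).flatMap (fun c => (natoData.getD c "").toList ++ [' ']) := by
  cases cs with
  | nil => simp [transcriptGo, PySem.Chars.upper]
  | cons d ds =>
    rw [transcriptGo]
    split
    next h => exact absurd h (by simp [PySem.Chars.upper])
    next c rest h =>
      have h' := h
      simp only [PySem.Chars.upper, List.map_cons, List.cons.injEq] at h'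
      obtain ⟨h1, h2⟩ := h'
      have hlen : rest.length < ds.length + 1 := by
        rw [← h2]; simp
      rw [transcriptGo_eq_flatMap rest]
      have hrest : PySem.Chars.upper rest = rest := by
        rw [← h2]; exact upper_idem ds
      rw [hrest, h]
      simp only [List.flatMap_cons, PySem.Dict.getD]
      cases natoData.get? c <;> simp
termination_by cs.length
decreasing_by simpa using hlen

-- per-character agreement of the two lookups, on the domain's characters
theorem piece_eq (c : Char) (h : pvDomChar c = true) :
    (natoData.getD (PySem.Chars.upperChar c) "").toList ++ [' '] = natoPiece c := by
  have hub : c.toNat ≤ 126 := by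
    simp [pvDomChar] at h; omega
  have hc := (Char.ofNat_toNat c).symm
  set n := c.toNat with hn
  rw [hc]
  clear hc h hn
  interval_cases n <;> decide

theorem join_nil_eq_flatten (parts : List (List Char)) :
    PySem.Chars.join [] parts = parts.flatten := by
  induction parts with
  | nil => simp [PySem.Chars.join, List.intercalate]
  | cons p ps ih =>
    cases ps with
    | nil => simp [PySem.Chars.join, List.intercalate]
    | cons q qs =>
      rw [PySem.Chars.join_cons_cons, ih]
      simp

-- ===== VERDICT =====
theorem transcript_spec : Claim_equal_transcript := by
  intro word hdom
  unfold Spec_transcript transcript transcript_alt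
  rw [transcriptGo_eq_flatMap, join_nil_eq_flatten, ← List.flatMap_def]
  congr 1
  simp only [PySem.Chars.upper, List.flatMap_map]
  apply List.flatMap_congr
  intro c hmem
  have : pvDomChar c = true := by
    have := hdom
    simp only [Dom_transcript, pvDomStr, List.all_eq_true] at this
    exact this c hmem
  exact piece_eq c this
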